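-- pv_equiv track=rewrite | github.com/udy11/coding-problems | codechef/contests/2014.05.18/ANUSAR.py | fqs
-- ===== SOURCE A (Python) =====
-- def fqs(f, s, n):
--     if f == 1:
--         return n * (n + 1) // 2
--     c = 0
--     for i in range(1, n+1):
--         for j in range(n-i+1):
--             s0 = s[j:j+i]
--             c0 = 0
--             for k in range(n-i+1):
--                 if s0 == s[k:k+i]:
--                     c0 += 1
--             if c0 == f:
--                 c += 1
--     return c
-- ===== SOURCE B (Python) =====
-- def fqs(f, s, n):
--     if f == 1:
--         return n * (n + 1) // 2
--     c = 0
--     groups = [list(range(n))]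
--     for L in range(1, n + 1):
--         refined = []
--         for g in groups:
--             valid = [p for p in g if p + L <= n]
--             seen = []
--             for p in valid:
--                 k = s[p+L-1:p+L]
--                 if k not in seen:
--                     seen.append(k)
--             for k in seen:
--                 refined.append([p for p in valid if s[p+L-1:p+L] == k])
--         groups = refined
--         for g in groups:
--             if len(g) == f:
--                 c += len(g)
--     return c
-- ===== Notes on version B (the rewrite author's own statement) =====
-- stated objective: faster
-- what changed: B never builds or counts per-length substring lists: it carries equivalence classes of starting positions across lengths and refines each class by the single next character (partition refinement), adding the sizes of classes of size f at each length.
import Mathlib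
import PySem

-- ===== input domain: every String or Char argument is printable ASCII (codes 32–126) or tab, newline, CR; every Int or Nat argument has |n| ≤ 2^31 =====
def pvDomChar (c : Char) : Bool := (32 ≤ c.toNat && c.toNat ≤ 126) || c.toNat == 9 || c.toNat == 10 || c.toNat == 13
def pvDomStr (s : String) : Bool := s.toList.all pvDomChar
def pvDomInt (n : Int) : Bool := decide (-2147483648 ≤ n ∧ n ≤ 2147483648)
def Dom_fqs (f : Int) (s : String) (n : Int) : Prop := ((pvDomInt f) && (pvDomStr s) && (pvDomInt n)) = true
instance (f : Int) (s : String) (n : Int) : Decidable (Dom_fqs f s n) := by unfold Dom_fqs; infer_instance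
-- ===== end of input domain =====

-- B counts by partition refinement: it carries the equivalence classes of starting positions
-- across lengths and refines each class by one character per step, instead of re-scanning all
-- substrings for every (length, position) pair (faster).
-- ===== PORT A =====
def fqs (f : Int) (s : String) (n : Int) : Int :=
  if f == 1 then PySem.Int.floordiv (n * (n + 1)) 2
  else
    (PySem.List.pyRange 1 (n + 1) 1).foldl (fun c i =>
      (PySem.List.pyRange 0 (n - i + 1) 1).foldl (fun c j =>
        let s0 := PySem.Str.slice s (some j) (some (j + i))
        let c0 := (PySem.List.pyRange 0 (n - i + 1) 1).foldl (fun c0 k =>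
          if s0 == PySem.Str.slice s (some k) (some (k + i)) then c0 + 1 else c0) (0 : Int)
        if c0 == f then c + 1 else c) c) 0

-- ===== PORT B =====
def fqs_alt (f : Int) (s : String) (n : Int) : Int :=
  if f == 1 then PySem.Int.floordiv (n * (n + 1)) 2
  else
    ((PySem.List.pyRange 1 (n + 1) 1).foldl (fun st L =>
      let refined := st.2.foldl (fun refined g =>
        let valid := g.filter (fun p => p + L ≤ n)
        let seen := valid.foldl (fun seen p =>
          let k := PySem.Str.slice s (some (p + L - 1)) (some (p + L))
          if seen.contains k then seen else seen ++ [k]) ([] : List String)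
        seen.foldl (fun refined k =>
          refined ++ [valid.filter (fun p =>
            PySem.Str.slice s (some (p + L - 1)) (some (p + L)) == k)]) refined) []
      let c := refined.foldl (fun c g =>
        if (g.length : Int) == f then c + (g.length : Int) else c) st.1
      (c, refined)) ((0 : Int), [PySem.List.pyRange 0 n 1])).1

-- ===== PRECONDITION & SPEC =====
def Spec_fqs (f : Int) (s : String) (n : Int) (out : Int) : Prop := out = fqs_alt f s n
instance (f : Int) (s : String) (n : Int) (out : Int) : Decidable (Spec_fqs f s n out) := by unfold Spec_fqs; infer_instance

-- ===== CLAIM (what is proved, stated in full; the proofs are below) =====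
def Claim_equal_fqs : Prop := ∀ (f : Int) (s : String) (n : Int), Dom_fqs f s n → Spec_fqs f s n (fqs f s n)

-- ===== LEMMAS AND PROOFS =====

-- the length-L substring of s starting at position p (clamped slice, as in Python)
def pvSl (s : String) (L p : Int) : String := PySem.Str.slice s (some p) (some (p + L))

-- the starting positions still alive at length L: 0 ≤ p < n with p + L ≤ n
def pvR (n L : Int) : List Int := PySem.List.pyRange 0 (min n (n - L + 1)) 1

-- loop invariant: the groups are exactly the equivalence classes of pvR n L under equality
-- of the length-L substring, and together they are a permutation of the position pool
def pvInv (s : String) (n L : Int) (groups : List (List Int)) : Prop :=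
  (∀ g ∈ groups, ∀ p ∈ g, g = (pvR n L).filter (fun q => pvSl s L q == pvSl s L p)) ∧
  groups.flatten.Perm (pvR n L)

theorem pvPyRange_nil {a b : Int} (h : b ≤ a) : PySem.List.pyRange a b = [] := by
  simp [PySem.List.pyRange]; omega

theorem pvPyRange_filter_nat (b : Int) : ∀ (k : Nat),
    (PySem.List.pyRange 0 (k:Int)).filter (fun p => decide (p ≤ b))
      = PySem.List.pyRange 0 (min (k:Int) (b+1)) := by
  intro k
  induction k with
  | zero =>
    rw [pvPyRange_nil (by omega), pvPyRange_nil (by omega)]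
    rfl
  | succ m ih =>
    rw [show ((m+1:Nat):Int) = (m:Int) + 1 by omega, PySem.List.pyRange_one_succ_right (by positivity)]
    rw [List.filter_append, ih]
    rcases le_or_gt ((m:Int)+1) (b+1) with hb | hb
    · rw [show min ((m:Int)) (b+1) = (m:Int) by omega, show min ((m:Int)+1) (b+1) = (m:Int)+1 by omega]
      rw [PySem.List.pyRange_one_succ_right (by positivity)]
      simp
      omega
    · rw [show min ((m:Int)+1) (b+1) = min ((m:Int)) (b+1) by omega]
      simp
      omega

theorem pvPyRange_filter (a b : Int) :
    (PySem.List.pyRange 0 a).filter (fun p => decide (p ≤ b))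
      = PySem.List.pyRange 0 (min a (b+1)) := by
  rcases le_or_gt a 0 with h | h
  · rw [pvPyRange_nil (by omega), pvPyRange_nil (by omega)]
    rfl
  · have := pvPyRange_filter_nat b a.toNat
    rw [show ((a.toNat : Nat):Int) = a by omega] at this
    exact this

theorem pvTake_succ_eq_iff {α : Type} (X Y : List α) (m : Nat) :
    X.take (m+1) = Y.take (m+1) ↔
      (X.take m = Y.take m ∧ (X.drop m).take 1 = (Y.drop m).take 1) := by
  constructor
  · intro h
    constructor
    · have := congrArg (List.take m) h
      simpa [List.take_take] using this
    · have := congrArg (List.drop m) h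
      simpa [List.drop_take] using this
  · rintro ⟨h1, h2⟩
    rw [List.take_add, List.take_add, h1, h2]

theorem pvSlice_succ_iff (s : String) (L p q : Int) (hL : 0 ≤ L) (hp : 0 ≤ p) (hq : 0 ≤ q) :
    pvSl s (L+1) q = pvSl s (L+1) p ↔
      (pvSl s L q = pvSl s L p ∧
       PySem.Str.slice s (some (q + L)) (some (q + L + 1))
         = PySem.Str.slice s (some (p + L)) (some (p + L + 1))) := by
  unfold pvSl
  rw [← String.toList_inj, ← String.toList_inj, ← String.toList_inj]
  simp only [PySem.Str.toList_slice, PySem.Chars.slice_eq_listSlice]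
  rw [PySem.List.slice_toNat _ hq (by omega), PySem.List.slice_toNat _ hp (by omega),
      PySem.List.slice_toNat _ hq (by omega), PySem.List.slice_toNat _ hp (by omega),
      PySem.List.slice_toNat _ (by omega : (0:Int) ≤ q + L) (by omega),
      PySem.List.slice_toNat _ (by omega : (0:Int) ≤ p + L) (by omega)]
  have e1 : (q + (L+1)).toNat - q.toNat = L.toNat + 1 := by omega
  have e2 : (p + (L+1)).toNat - p.toNat = L.toNat + 1 := by omega
  have e3 : (q + L).toNat - q.toNat = L.toNat := by omega
  have e4 : (p + L).toNat - p.toNat = L.toNat := by omega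
  have e5 : (q + L + 1).toNat - (q + L).toNat = 1 := by omega
  have e6 : (p + L + 1).toNat - (p + L).toNat = 1 := by omega
  have e7 : (q + L).toNat = q.toNat + L.toNat := by omega
  have e8 : (p + L).toNat = p.toNat + L.toNat := by omega
  rw [e1, e2, e3, e4, e5, e6, e7, e8, ← List.drop_drop, ← List.drop_drop]
  exact pvTake_succ_eq_iff _ _ _

theorem pvSeen_mem {α : Type} [BEq α] [LawfulBEq α] (l : List α) (acc : List α) (x : α) :
    x ∈ l.foldl (fun sn k => if sn.contains k then sn else sn ++ [k]) acc ↔ x ∈ acc ∨ x ∈ l := by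
  induction l generalizing acc with
  | nil => simp
  | cons a l ih =>
    simp only [List.foldl_cons]
    by_cases h : acc.contains a
    · rw [if_pos h, ih]
      have : a ∈ acc := by simpa using h
      constructor
      · rintro (h1 | h1) <;> simp_all
      · rintro (h1 | h1)
        · exact Or.inl h1
        · rcases List.mem_cons.mp h1 with rfl | h2
          · exact Or.inl this
          · exact Or.inr h2
    · rw [if_neg h, ih]
      constructor
      · rintro (h1 | h1)
        · rcases List.mem_append.mp h1 with h2 | h2
          · exact Or.inl h2
          · simp at h2; subst h2; simp
        · simp [h1]
      · rintro (h1 | h1)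
        · exact Or.inl (List.mem_append.mpr (Or.inl h1))
        · rcases List.mem_cons.mp h1 with rfl | h2
          · exact Or.inl (by simp)
          · exact Or.inr h2

theorem pvSeen_nodup {α : Type} [BEq α] [LawfulBEq α] (l : List α) (acc : List α) (h : acc.Nodup) :
    (l.foldl (fun sn k => if sn.contains k then sn else sn ++ [k]) acc).Nodup := by
  induction l generalizing acc with
  | nil => simpa
  | cons a l ih =>
    simp only [List.foldl_cons]
    by_cases hc : acc.contains a
    · rw [if_pos hc]; exact ih _ h
    · rw [if_neg hc]
      refine ih _ ?_
      have : a ∉ acc := by simpa using hc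
      simp only [List.nodup_append, List.nodup_cons, List.nodup_nil]
      refine ⟨h, by simp, ?_⟩
      intro y hy b hb
      simp only [List.mem_singleton] at hb
      subst hb
      rintro rfl
      exact this hy

theorem pvPartition_perm {α κ : Type} [BEq κ] [LawfulBEq κ] (key : α → κ) :
    ∀ (seen : List κ) (valid : List α), seen.Nodup → (∀ p ∈ valid, key p ∈ seen) →
    (seen.flatMap (fun k => valid.filter (fun p => key p == k))).Perm valid := by
  intro seen
  induction seen with
  | nil =>
    intro valid _ hall
    have : valid = [] := by
      cases valid with
      | nil => rfl
      | cons a l => exact absurd (hall a (by simp)) (by simp)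
    simp [this]
  | cons k ks ih =>
    intro valid hnd hall
    rw [List.flatMap_cons]
    have hks : ∀ k' ∈ ks, (valid.filter (fun p => key p == k'))
        = ((valid.filter (fun p => !(key p == k))).filter (fun p => key p == k')) := by
      intro k' hk'
      rw [List.filter_filter]
      apply List.filter_congr
      intro p _
      have hne : k' ≠ k := by rintro rfl; exact (List.nodup_cons.mp hnd).1 hk'
      by_cases he : key p == k'
      · have : key p = k' := by simpa using he
        simp [this, hne]
      · simp [he]
    have hmap : ks.flatMap (fun k' => valid.filter (fun p => key p == k'))
        = ks.flatMap (fun k' => (valid.filter (fun p => !(key p == k))).filter (fun p => key p == k')) :=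
      List.flatMap_congr hks
    rw [hmap]
    have hrest := ih (valid.filter (fun p => !(key p == k))) (List.nodup_cons.mp hnd).2 (by
      intro p hp
      have hp2 := List.of_mem_filter hp
      have := hall p (List.mem_of_mem_filter hp)
      rcases List.mem_cons.mp this with he | h2
      · exfalso; rw [he] at hp2; simp at hp2
      · exact h2)
    exact (List.Perm.append_left _ hrest).trans (List.filter_append_perm _ _)

theorem pvPool (n L : Int) (hL : 0 ≤ L) :
    pvR n (L+1) = (pvR n L).filter (fun q => decide (q + L + 1 ≤ n)) := by
  calc pvR n (L+1)
      = PySem.List.pyRange 0 (min (min n (n - L + 1)) ((n - L - 1) + 1)) := by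
        unfold pvR; congr 1; omega
    _ = (pvR n L).filter (fun q => decide (q ≤ n - L - 1)) := (pvPyRange_filter _ _).symm
    _ = (pvR n L).filter (fun q => decide (q + L + 1 ≤ n)) := by
        apply List.filter_congr
        intro q _
        exact decide_eq_decide.mpr (by omega)

theorem pvStep (s : String) (n L : Int) (hL : 0 ≤ L) (groups : List (List Int))
    (h : pvInv s n L groups) :
    pvInv s n (L+1) (groups.foldl (fun refined g =>
      let valid := g.filter (fun p => p + (L+1) ≤ n)
      let seen := valid.foldl (fun seen p =>
        let k := PySem.Str.slice s (some (p + (L+1) - 1)) (some (p + (L+1)))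
        if seen.contains k then seen else seen ++ [k]) ([] : List String)
      seen.foldl (fun refined k =>
        refined ++ [valid.filter (fun p =>
          PySem.Str.slice s (some (p + (L+1) - 1)) (some (p + (L+1))) == k)]) refined) []) := by
  obtain ⟨hclass, hperm⟩ := h
  have harr2 : ∀ p : Int, p + (L + 1) = p + L + 1 := fun p => by ring
  have harr3 : ∀ p : Int, p + L + 1 - 1 = p + L := fun p => by ring
  simp only [harr2, harr3, PySem.List.foldl_append_singleton_eq_map,
    PySem.List.foldl_append_eq_flatMap, List.nil_append]
  constructor
  · intro h hh p hp
    rcases List.mem_flatMap.mp hh with ⟨g, hg, hsub⟩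
    rcases List.mem_map.mp hsub with ⟨k, hk, rfl⟩
    have hpv : p ∈ g.filter (fun p => decide (p + L + 1 ≤ n)) := List.mem_of_mem_filter hp
    have hkey : PySem.Str.slice s (some (p + L)) (some (p + L + 1)) = k := by
      have := List.of_mem_filter hp; simpa using this
    have hpg : p ∈ g := List.mem_of_mem_filter hpv
    have hgc := hclass g hg p hpg
    have hpR : p ∈ pvR n L := by
      rw [hgc] at hpg; exact List.mem_of_mem_filter hpg
    have hp0 : 0 ≤ p := by
      unfold pvR at hpR
      exact (PySem.List.mem_pyRange_one.mp hpR).1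
    subst hkey
    rw [pvPool n L hL]
    conv_lhs => rw [hgc]
    simp only [List.filter_filter]
    apply List.filter_congr
    intro q hq
    have hq0 : 0 ≤ q := by
      unfold pvR at hq
      exact (PySem.List.mem_pyRange_one.mp hq).1
    have hiff := pvSlice_succ_iff s L p q hL hp0 hq0
    apply Bool.eq_iff_iff.mpr
    simp only [Bool.and_eq_true, beq_iff_eq, decide_eq_true_eq]
    unfold pvSl at hiff ⊢
    simp only [harr2] at hiff ⊢
    constructor
    · rintro ⟨hkeq, hval, hsleq⟩
      exact ⟨hiff.mpr ⟨hsleq, hkeq⟩, hval⟩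
    · rintro ⟨hsleq, hval⟩
      rcases hiff.mp hsleq with ⟨h1, h2⟩
      exact ⟨h2, hval, h1⟩
  · have hgroup : ∀ g : List Int,
        ((((g.filter (fun p => decide (p + L + 1 ≤ n))).foldl (fun sn p =>
            if sn.contains (PySem.Str.slice s (some (p + L)) (some (p + L + 1))) then sn
            else sn ++ [PySem.Str.slice s (some (p + L)) (some (p + L + 1))]) []).map
          (fun k => (g.filter (fun p => decide (p + L + 1 ≤ n))).filter
            (fun p => PySem.Str.slice s (some (p + L)) (some (p + L + 1)) == k))).flatten).Perm
        (g.filter (fun p => decide (p + L + 1 ≤ n))) := by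
      intro g
      have hseen : ((g.filter (fun p => decide (p + L + 1 ≤ n))).foldl (fun sn p =>
            if sn.contains (PySem.Str.slice s (some (p + L)) (some (p + L + 1))) then sn
            else sn ++ [PySem.Str.slice s (some (p + L)) (some (p + L + 1))]) ([] : List String))
          = (((g.filter (fun p => decide (p + L + 1 ≤ n))).map
              (fun p => PySem.Str.slice s (some (p + L)) (some (p + L + 1)))).foldl
            (fun sn k => if sn.contains k then sn else sn ++ [k]) ([] : List String)) :=
        (List.foldl_map
          (f := fun p : Int => PySem.Str.slice s (some (p + L)) (some (p + L + 1)))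
          (g := fun (sn : List String) (k : String) => if sn.contains k then sn else sn ++ [k])
          (l := g.filter (fun p => decide (p + L + 1 ≤ n))) (init := ([] : List String))).symm
      rw [hseen, ← List.flatMap_def]
      apply pvPartition_perm
      · exact pvSeen_nodup _ _ List.nodup_nil
      · intro p hp
        rw [pvSeen_mem]
        exact Or.inr (List.mem_map_of_mem hp)
    have hmain : ∀ gs : List (List Int),
        ((gs.flatMap (fun g =>
          (((g.filter (fun p => decide (p + L + 1 ≤ n))).foldl (fun sn p =>
              if sn.contains (PySem.Str.slice s (some (p + L)) (some (p + L + 1))) then sn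
              else sn ++ [PySem.Str.slice s (some (p + L)) (some (p + L + 1))]) []).map
            (fun k => (g.filter (fun p => decide (p + L + 1 ≤ n))).filter
              (fun p => PySem.Str.slice s (some (p + L)) (some (p + L + 1)) == k))))).flatten).Perm
        ((gs.flatten).filter (fun p => decide (p + L + 1 ≤ n))) := by
      intro gs
      induction gs with
      | nil => simp
      | cons g gs ih =>
        simp only [List.flatMap_cons, List.flatten_append, List.flatten_cons, List.filter_append]
        exact (hgroup g).append ih
    refine (hmain groups).trans ?_
    rw [pvPool n L hL]
    exact hperm.filter _

theorem pvCount (s : String) (n i f c : Int) (hi : 1 ≤ i) (groups : List (List Int))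
    (h : pvInv s n i groups) :
    groups.foldl (fun c g =>
        if (g.length : Int) == f then c + (g.length : Int) else c) c
    = (PySem.List.pyRange 0 (n - i + 1) 1).foldl (fun c j =>
        let s0 := PySem.Str.slice s (some j) (some (j + i))
        let c0 := (PySem.List.pyRange 0 (n - i + 1) 1).foldl (fun c0 k =>
          if s0 == PySem.Str.slice s (some k) (some (k + i)) then c0 + 1 else c0) (0 : Int)
        if c0 == f then c + 1 else c) c := by
  obtain ⟨hclass, hperm⟩ := h
  have hR : PySem.List.pyRange 0 (n - i + 1) 1 = pvR n i := by
    unfold pvR; congr 1; omega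
  rw [hR]
  simp only [PySem.List.foldl_count_if, zero_add]
  -- B side
  have hsplit : (fun (c : Int) (g : List Int) =>
      if (g.length : Int) == f then c + (g.length : Int) else c)
      = fun (c : Int) (g : List Int) => c + (if (g.length : Int) == f then (g.length : Int) else 0) := by
    funext c g; split <;> simp
  rw [hsplit, PySem.List.foldl_add]
  congr 1
  -- the per-position 0/1 weight
  have key : ∀ g ∈ groups, (g.map (fun p =>
      if ((List.countP (fun q => pvSl s i q == pvSl s i p) (pvR n i) : Int) == f) then (1:Int) else 0)).sum
      = (if (g.length : Int) == f then (g.length : Int) else 0) := by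
    intro g hg
    have hconst : ∀ p ∈ g, (if ((List.countP (fun q => pvSl s i q == pvSl s i p) (pvR n i) : Int) == f) then (1:Int) else 0)
        = (if (g.length : Int) == f then (1:Int) else 0) := by
      intro p hp
      have hgc := hclass g hg p hp
      have : List.countP (fun q => pvSl s i q == pvSl s i p) (pvR n i) = g.length := by
        rw [List.countP_eq_length_filter, ← hgc]
      rw [this]
    rw [List.map_congr_left hconst, PySem.List.sum_map_const_int]
    split
    · simp
    · simp
  calc (groups.map (fun g => if (g.length : Int) == f then (g.length : Int) else 0)).sum
      = (groups.map (fun g => (g.map (fun p =>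
          if ((List.countP (fun q => pvSl s i q == pvSl s i p) (pvR n i) : Int) == f) then (1:Int) else 0)).sum)).sum := by
        rw [List.map_congr_left key]
    _ = ((groups.flatten).map (fun p =>
          if ((List.countP (fun q => pvSl s i q == pvSl s i p) (pvR n i) : Int) == f) then (1:Int) else 0)).sum := by
        rw [List.map_flatten, List.sum_flatten, List.map_map]
        rfl
    _ = ((pvR n i).map (fun p =>
          if ((List.countP (fun q => pvSl s i q == pvSl s i p) (pvR n i) : Int) == f) then (1:Int) else 0)).sum :=
        (hperm.map _).sum_eq
    _ = (List.countP (fun p => (List.countP (fun q => pvSl s i q == pvSl s i p) (pvR n i) : Int) == f) (pvR n i) : Int) :=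
        PySem.List.sum_map_ite_one_zero _ _
    _ = _ := by
        congr 1
        apply List.countP_congr
        intro j hj
        have hcp : List.countP (fun q => pvSl s i q == pvSl s i j) (pvR n i)
            = List.countP (fun x => PySem.Str.slice s (some j) (some (j + i))
                == PySem.Str.slice s (some x) (some (x + i))) (pvR n i) := by
          apply List.countP_congr
          intro x hx
          unfold pvSl
          simp only [beq_iff_eq]
          exact eq_comm
        simp only [beq_iff_eq, hcp]

theorem pvLoop (s : String) (n f : Int) : ∀ (m : Nat) (L c : Int) (groups : List (List Int)),
    0 ≤ L → (n - L).toNat = m → pvInv s n L groups →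
    (PySem.List.pyRange (L+1) (n+1) 1).foldl (fun c i =>
      (PySem.List.pyRange 0 (n - i + 1) 1).foldl (fun c j =>
        let s0 := PySem.Str.slice s (some j) (some (j + i))
        let c0 := (PySem.List.pyRange 0 (n - i + 1) 1).foldl (fun c0 k =>
          if s0 == PySem.Str.slice s (some k) (some (k + i)) then c0 + 1 else c0) (0 : Int)
        if c0 == f then c + 1 else c) c) c
    = ((PySem.List.pyRange (L+1) (n+1) 1).foldl (fun st Li =>
      let refined := st.2.foldl (fun refined g =>
        let valid := g.filter (fun p => p + Li ≤ n)
        let seen := valid.foldl (fun seen p =>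
          let k := PySem.Str.slice s (some (p + Li - 1)) (some (p + Li))
          if seen.contains k then seen else seen ++ [k]) ([] : List String)
        seen.foldl (fun refined k =>
          refined ++ [valid.filter (fun p =>
            PySem.Str.slice s (some (p + Li - 1)) (some (p + Li)) == k)]) refined) []
      let c := refined.foldl (fun c g =>
        if (g.length : Int) == f then c + (g.length : Int) else c) st.1
      (c, refined)) (c, groups)).1 := by
  intro m
  induction m with
  | zero =>
    intro L c groups hL hm hInv
    rw [pvPyRange_nil (by omega)]
    simp
  | succ m ih =>
    intro L c groups hL hm hInv
    rw [PySem.List.pyRange_one_cons (by omega : L + 1 < n + 1)]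
    simp only [List.foldl_cons]
    have hstep := pvStep s n L hL groups hInv
    have hcnt := pvCount s n (L+1) f c (by omega) _ hstep
    rw [← hcnt]
    exact ih (L+1) _ _ (by omega) (by omega) hstep

theorem pvSl_zero (s : String) (q : Int) (hq : 0 ≤ q) : pvSl s 0 q = "" := by
  unfold pvSl
  rw [← String.toList_inj]
  simp only [PySem.Str.toList_slice, PySem.Chars.slice_eq_listSlice]
  rw [PySem.List.slice_toNat _ hq (by omega)]
  simp

theorem pvInv_init (s : String) (n : Int) : pvInv s n 0 [PySem.List.pyRange 0 n 1] := by
  have hR0 : pvR n 0 = PySem.List.pyRange 0 n 1 := by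
    unfold pvR; congr 1; omega
  constructor
  · intro g hg p hp
    simp only [List.mem_singleton] at hg
    subst hg
    rw [hR0]
    symm
    apply List.filter_eq_self.mpr
    intro q hq
    have hq0 : 0 ≤ q := (PySem.List.mem_pyRange_one.mp hq).1
    have hp0 : 0 ≤ p := (PySem.List.mem_pyRange_one.mp hp).1
    rw [pvSl_zero s q hq0, pvSl_zero s p hp0]
    simp
  · rw [hR0]
    simp

-- ===== VERDICT (by name: the statement is the Claim_ definition above) =====
theorem fqs_spec : Claim_equal_fqs := by
  intro f s n _
  unfold Spec_fqs fqs fqs_alt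
  by_cases hf : f == 1
  · simp [hf]
  · simp only [hf, Bool.false_eq_true, if_false]
    have h := pvLoop s n f (n - 0).toNat 0 0 [PySem.List.pyRange 0 n 1] le_rfl rfl (pvInv_init s n)
    simpa using h
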